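-- pv_equiv track=rewrite | github.com/mgiannopoulos24/Leetcode | Python/1737.py | minCharacters
-- ===== SOURCE A (Python) =====
-- def minCharacters(a: str, b: str) -> int:
--     # Frequency count for each character in a and b
--     count_a = [0] * 26
--     count_b = [0] * 26
--     for char in a:
--         count_a[ord(char) - ord('a')] += 1
--     for char in b:
--         count_b[ord(char) - ord('a')] += 1
--
--     # Calculate the length of a and b
--     len_a = len(a)
--     len_b = len(b)
--
--     # Condition 3: Make both a and b have only one distinct letter
--     max_freq_a = max(count_a)
--     max_freq_b = max(count_b)
--     condition3_operations = (len_a - max_freq_a) + (len_b - max_freq_b)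
--
--     # Condition 1 and Condition 2: Cumulative sums for less-than conditions
--     min_operations = condition3_operations
--     cumulative_a = cumulative_b = 0
--
--     for i in range(25):  # Only go up to 'y' for cutoff
--         cumulative_a += count_a[i]
--         cumulative_b += count_b[i]
--
--         # Condition 1: All chars in `a` < all chars in `b`
--         condition1_operations = (len_a - cumulative_a) + cumulative_b
--         min_operations = min(min_operations, condition1_operations)
--
--         # Condition 2: All chars in `b` < all chars in `a`
--         condition2_operations = (len_b - cumulative_b) + cumulative_a
--         min_operations = min(min_operations, condition2_operations)
--
--     return min_operations
-- ===== SOURCE B (Python) =====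
-- def minCharacters(a: str, b: str) -> int:
--     # baseline: make each string one single repeated letter -> remove all but the most frequent char
--     best = (len(a) - max(map(a.count, set(a)), default=0)) + (len(b) - max(map(b.count, set(b)), default=0))
--     # for each cutoff letter, count offending characters directly by comparison scans
--     for cut in "abcdefghijklmnopqrstuvwxy":
--         c1 = sum(ch > cut for ch in a) + sum(ch <= cut for ch in b)
--         c2 = sum(ch > cut for ch in b) + sum(ch <= cut for ch in a)
--         best = min(best, c1, c2)
--     return best
-- ===== Notes on version B (the rewrite author's own statement) =====
-- stated objective: alternative
-- what changed: B drops A's frequency arrays and incremental prefix-sum/running-min accumulator entirely: the single-letter baseline comes from max(map(count)) over set(s), and each cutoff's cost is counted by direct character-comparison scans (ch > cut / ch <= cut) over the raw strings.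
-- outside the precondition, e.g. on minCharacters('r', 'j]'): A returns 1, B returns 0; on minCharacters('p{', 'z'): A raises IndexError, B returns 1
import Mathlib
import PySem

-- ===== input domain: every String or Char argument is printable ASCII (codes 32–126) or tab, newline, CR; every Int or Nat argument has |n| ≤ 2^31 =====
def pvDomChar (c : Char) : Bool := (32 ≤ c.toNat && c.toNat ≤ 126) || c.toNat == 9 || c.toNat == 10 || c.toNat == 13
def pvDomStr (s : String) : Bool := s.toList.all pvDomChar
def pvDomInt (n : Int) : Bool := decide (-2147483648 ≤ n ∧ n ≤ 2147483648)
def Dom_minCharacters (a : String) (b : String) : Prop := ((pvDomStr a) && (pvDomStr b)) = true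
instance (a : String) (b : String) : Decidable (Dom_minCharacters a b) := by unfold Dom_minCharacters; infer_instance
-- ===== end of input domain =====

-- B drops the frequency/prefix-sum machinery: the single-letter baseline comes from max(map(count)) over the
-- string itself and each cutoff's cost is counted by direct character-comparison scans over the raw strings.

-- ===== PORT A =====
-- count_x[ord(char) - ord('a')] += 1 : pyGetD/pySetD are PySem's total forms of xs[i]; exact wherever Python
-- does not raise IndexError (Pre_ keeps the index in 0..25)
def pvBump (xs : List Int) (idx : Int) : List Int :=
  PySem.List.pySetD xs idx (PySem.List.pyGetD xs idx 0 + 1)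

-- the two identical counting for-loops of A
def pvCountFold (s : List Char) : List Int :=
  s.foldl (fun xs ch => pvBump xs ((ch.toNat : Int) - 97)) (List.replicate 26 0)

-- Python max(xs) (A) / max(iter, default=0) (B): the running-extremum fold; the [] branch is
-- A's unreachable-empty case and exactly B's default=0
def pvMax (xs : List Int) : Int := match xs with | [] => 0 | x :: t => t.foldl max x

def minCharacters (a : String) (b : String) : Int :=
  let countA := pvCountFold a.toList
  let countB := pvCountFold b.toList
  let lenA : Int := PySem.Str.len a
  let lenB : Int := PySem.Str.len b
  let cond3 := (lenA - pvMax countA) + (lenB - pvMax countB)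
  let final := (PySem.List.pyRange 0 25 1).foldl
    (fun (st : Int × Int × Int) i =>
      let cumA := st.2.1 + PySem.List.pyGetD countA i 0
      let cumB := st.2.2 + PySem.List.pyGetD countB i 0
      let m1 := min st.1 (lenA - cumA + cumB)
      let m2 := min m1 (lenB - cumB + cumA)
      (m2, cumA, cumB)) (cond3, 0, 0)
  final.1

-- ===== PORT B =====
-- sum(bool for …) is a countP; max(map(a.count, set(a)), default=0) is pvMax of the mapped Set list
-- (max of Ints without key: independent of Python's set iteration order)
def minCharacters_alt (a : String) (b : String) : Int :=
  let la := a.toList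
  let lb := b.toList
  let best0 := (PySem.Str.len a - pvMax ((PySem.Set.ofList la).map (fun ch => (la.count ch : Int))))
             + (PySem.Str.len b - pvMax ((PySem.Set.ofList lb).map (fun ch => (lb.count ch : Int))))
  "abcdefghijklmnopqrstuvwxy".toList.foldl
    (fun best cut =>
      min (min best ((la.countP (fun ch => cut < ch) : Int) + (lb.countP (fun ch => ch ≤ cut) : Int)))
          ((lb.countP (fun ch => cut < ch) : Int) + (la.countP (fun ch => ch ≤ cut) : Int))) best0

-- ===== PRECONDITION & SPEC =====
-- Pre_ restricts to the problem's natural domain of lowercase-letter strings (the LeetCode 1737 constraint);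
-- outside it A raises IndexError for most characters, and for character codes 71–96 returns an accidental
-- value produced by negative-index wraparound into the 26-slot arrays.
def Pre_minCharacters (a : String) (b : String) : Prop :=
  (a.toList.all (fun c => 97 ≤ c.toNat && c.toNat ≤ 122)
    && b.toList.all (fun c => 97 ≤ c.toNat && c.toNat ≤ 122)) = true
instance (a : String) (b : String) : Decidable (Pre_minCharacters a b) := by
  unfold Pre_minCharacters; infer_instance

def pvWitness_minCharacters : String × String := ("dba", "abc")

def Spec_minCharacters (a : String) (b : String) (out : Int) : Prop := out = minCharacters_alt a b
instance (a : String) (b : String) (out : Int) : Decidable (Spec_minCharacters a b out) := by unfold Spec_minCharacters; infer_instance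

-- ===== CLAIM (what is proved, stated in full; the proofs are below) =====
def Claim_equal_minCharacters : Prop := ∀ (a : String) (b : String), Dom_minCharacters a b → Pre_minCharacters a b → Spec_minCharacters a b (minCharacters a b)

-- ===== LEMMAS AND PROOFS =====

-- A's counting loop, elementwise: starting from any 26-slot array xs, each lowercase char bumps its slot.
theorem pvCountFoldAux (l : List Char) (h : ∀ c ∈ l, 97 ≤ c.toNat ∧ c.toNat ≤ 122) :
    ∀ (xs : List Int), xs.length = 26 →
      l.foldl (fun xs ch => pvBump xs ((ch.toNat : Int) - 97)) xs
        = (List.range 26).map (fun i => xs.getD i 0 + (l.count (Char.ofNat (97 + i)) : Int)) := by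
  induction l with
  | nil =>
    intro xs hlen
    simp only [List.foldl_nil, List.count_nil, Int.natCast_zero, add_zero]
    refine List.ext_getElem (by simp [hlen]) (fun i h1 h2 => ?_)
    have hi : i < xs.length := h1
    simp [List.getD_eq_getElem?_getD, List.getElem?_eq_getElem hi]
  | cons c t ih =>
    intro xs hlen
    obtain ⟨hc1, hc2⟩ := h c List.mem_cons_self
    have hk : c.toNat - 97 < 26 := by omega
    have hcast : (c.toNat : Int) - 97 = ((c.toNat - 97 : Nat) : Int) := by omega
    simp only [List.foldl_cons]
    have hbump : pvBump xs ((c.toNat : Int) - 97)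
        = xs.set (c.toNat - 97) (xs.getD (c.toNat - 97) 0 + 1) := by
      simp only [pvBump]
      rw [hcast, PySem.List.pySetD_natCast, PySem.List.pyGetD_natCast]
    rw [hbump, ih (fun d hd => h d (List.mem_cons_of_mem _ hd)) _ (by simp [hlen])]
    refine List.map_congr_left (fun i hi => ?_)
    have hi26 : i < 26 := List.mem_range.mp hi
    have hvalid : (97 + i).isValidChar := Or.inl (by omega)
    have hgetset : (xs.set (c.toNat - 97) (xs.getD (c.toNat - 97) 0 + 1)).getD i 0
        = if i = c.toNat - 97 then xs.getD (c.toNat - 97) 0 + 1 else xs.getD i 0 := by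
      by_cases hik0 : i = c.toNat - 97
      · subst hik0
        rw [if_pos rfl, List.getD_eq_getElem?_getD,
            List.getElem?_set_eq_of_lt _ (by omega : c.toNat - 97 < xs.length)]
        rfl
      · rw [if_neg hik0, List.getD_eq_getElem?_getD, List.getD_eq_getElem?_getD,
            List.getElem?_set_ne (fun hh => hik0 hh.symm)]
        rfl
    by_cases hik : i = c.toNat - 97
    · subst hik
      have hchar : Char.ofNat (97 + (c.toNat - 97)) = c := by
        have h97 : 97 + (c.toNat - 97) = c.toNat := by omega
        rw [h97, Char.ofNat_toNat]
      rw [hgetset, if_pos rfl, hchar, List.count_cons]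
      simp only [beq_self_eq_true, if_pos]
      push_cast
      ring
    · have hne : Char.ofNat (97 + i) ≠ c := by
        intro heq
        have h97 : (Char.ofNat (97 + i)).toNat = c.toNat := by rw [heq]
        rw [Char.toNat_ofNat, if_pos hvalid] at h97
        omega
      rw [hgetset, if_neg hik, List.count_cons]
      simp only [beq_iff_eq]
      rw [if_neg (fun hh => hne hh.symm)]
      push_cast
      ring

-- A's frequency array is exactly the per-letter count list.
theorem pvCountFold_eq (l : List Char) (h : ∀ c ∈ l, 97 ≤ c.toNat ∧ c.toNat ≤ 122) :
    pvCountFold l = (List.range 26).map (fun i => (l.count (Char.ofNat (97 + i)) : Int)) := by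
  rw [pvCountFold, pvCountFoldAux l h (List.replicate 26 0) (by simp)]
  refine List.map_congr_left (fun i hi => ?_)
  have hrep : (List.replicate 26 (0 : Int)).getD i 0 = 0 := by
    rw [List.getD_eq_getElem?_getD, List.getElem?_replicate]
    split <;> rfl
  rw [hrep, zero_add]

-- A's cutoff loop state after the first n steps: running min over the first 2n candidates, prefix sums.
theorem pvLoopAux (ca cb : List Int) (hca : ca.length = 26) (hcb : cb.length = 26)
    (la lb c3 : Int) (n : Nat) (hn : n ≤ 25) :
    (PySem.List.pyRange 0 (n : Int) 1).foldl
      (fun (st : Int × Int × Int) i =>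
        (min (min st.1 (la - (st.2.1 + PySem.List.pyGetD ca i 0) + (st.2.2 + PySem.List.pyGetD cb i 0)))
             (lb - (st.2.2 + PySem.List.pyGetD cb i 0) + (st.2.1 + PySem.List.pyGetD ca i 0)),
         st.2.1 + PySem.List.pyGetD ca i 0, st.2.2 + PySem.List.pyGetD cb i 0)) (c3, 0, 0)
    = (((List.range n).flatMap (fun i =>
          [la - (ca.take (i+1)).sum + (cb.take (i+1)).sum,
           lb - (cb.take (i+1)).sum + (ca.take (i+1)).sum])).foldl min c3,
       (ca.take n).sum, (cb.take n).sum) := by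
  induction n with
  | zero => simp [PySem.List.pyRange_one_eq_nil]
  | succ m ih =>
    have hm : m ≤ 25 := by omega
    have hcast : ((m + 1 : Nat) : Int) = (m : Int) + 1 := by push_cast; ring
    rw [hcast, PySem.List.pyRange_one_succ_right (by positivity), List.foldl_append, ih hm]
    have hgetA : PySem.List.pyGetD ca ((m : Nat) : Int) 0 = ca[m]'(by omega) := by
      rw [PySem.List.pyGetD_natCast]
      simp [List.getD_eq_getElem?_getD, List.getElem?_eq_getElem (show m < ca.length by omega)]
    have hgetB : PySem.List.pyGetD cb ((m : Nat) : Int) 0 = cb[m]'(by omega) := by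
      rw [PySem.List.pyGetD_natCast]
      simp [List.getD_eq_getElem?_getD, List.getElem?_eq_getElem (show m < cb.length by omega)]
    rw [List.range_succ, List.flatMap_append, List.foldl_append]
    simp only [List.foldl_cons, List.foldl_nil, List.flatMap_cons, List.flatMap_nil,
      List.append_nil, hgetA, hgetB,
      List.sum_take_succ ca m (by omega), List.sum_take_succ cb m (by omega)]

-- the wrapper at n = 25, first component, as a min over the candidate list
theorem pvLoop_eq (ca cb : List Int) (hca : ca.length = 26) (hcb : cb.length = 26)
    (la lb c3 : Int) :
    ((PySem.List.pyRange 0 25 1).foldl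
      (fun (st : Int × Int × Int) i =>
        (min (min st.1 (la - (st.2.1 + PySem.List.pyGetD ca i 0) + (st.2.2 + PySem.List.pyGetD cb i 0)))
             (lb - (st.2.2 + PySem.List.pyGetD cb i 0) + (st.2.1 + PySem.List.pyGetD ca i 0)),
         st.2.1 + PySem.List.pyGetD ca i 0, st.2.2 + PySem.List.pyGetD cb i 0)) (c3, 0, 0)).1
    = ((List.range 25).flatMap (fun i =>
        [la - (ca.take (i+1)).sum + (cb.take (i+1)).sum,
         lb - (cb.take (i+1)).sum + (ca.take (i+1)).sum])).foldl min c3 := by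
  have h25 : (25 : Int) = ((25 : Nat) : Int) := by norm_num
  rw [h25, pvLoopAux ca cb hca hcb la lb c3 25 (by omega)]

-- B's 25-step running-min loop is the fold of min over the flattened candidate list
theorem pv_foldl_minpair (f g : Nat → Int) (c : Int) (n : Nat) :
    (List.range n).foldl (fun best i => min (min best (f i)) (g i)) c
    = ((List.range n).flatMap (fun i => [f i, g i])).foldl min c := by
  induction n with
  | zero => rfl
  | succ m ih =>
    rw [List.range_succ, List.foldl_append, List.flatMap_append, List.foldl_append, ih]
    simp

-- the literal cutoff string of B, as the 25 letters 'a'..'y'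
theorem pv_cutChars : "abcdefghijklmnopqrstuvwxy".toList
    = (List.range 25).map (fun i => Char.ofNat (97 + i)) := by decide

-- counting one letter is countP on the character code (97+k a valid char code)
theorem pv_count_eq_countP (l : List Char) (k : Nat) (hk : k < 26) :
    l.count (Char.ofNat (97 + k)) = l.countP (fun ch => decide (ch.toNat = 97 + k)) := by
  rw [List.count_eq_countP]
  refine List.countP_congr (fun ch _ => ?_)
  have hvalid : (97 + k).isValidChar := Or.inl (by omega)
  have hcut : (Char.ofNat (97 + k)).toNat = 97 + k := by rw [Char.toNat_ofNat, if_pos hvalid]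
  by_cases h : ch.toNat = 97 + k
  · have he : ch = Char.ofNat (97 + k) := by rw [← Char.ofNat_toNat ch, h]
    simp [he, hcut]
  · have he : ch ≠ Char.ofNat (97 + k) := by
      intro he; rw [he, hcut] at h; exact h rfl
    simp [he, h]

-- one step of the prefix-count: chars below m plus chars equal to m are the chars below m+1
theorem pv_countP_lt_step (l : List Char) (m : Nat) :
    l.countP (fun ch => decide (ch.toNat < m)) + l.countP (fun ch => decide (ch.toNat = m))
      = l.countP (fun ch => decide (ch.toNat < m + 1)) := by
  induction l with
  | nil => rfl
  | cons c t ih =>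
    simp only [List.countP_cons, decide_eq_true_eq]
    split_ifs <;> omega

-- prefix sums of the per-letter counts are prefix counts of the character codes
theorem pv_sumCounts (l : List Char) (hl : ∀ c ∈ l, 97 ≤ c.toNat ∧ c.toNat ≤ 122) (k : Nat) (hk : k ≤ 26) :
    ((List.range k).map (fun j => (l.count (Char.ofNat (97 + j)) : Int))).sum
      = (l.countP (fun ch => decide (ch.toNat < 97 + k)) : Int) := by
  induction k with
  | zero =>
    have h0 : l.countP (fun ch => decide (ch.toNat < 97)) = 0 := by
      rw [List.countP_eq_zero]
      intro c hc
      have := (hl c hc).1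
      simp only [decide_eq_true_eq]
      omega
    simp [h0]
  | succ m ih =>
    rw [List.range_succ, List.map_append, List.sum_append, ih (by omega)]
    simp only [List.map_cons, List.map_nil, List.sum_cons, List.sum_nil, add_zero]
    rw [pv_count_eq_countP l m (by omega)]
    have h2 := pv_countP_lt_step l (97 + m)
    have harith : 97 + m + 1 = 97 + (m + 1) := by omega
    rw [harith] at h2
    exact_mod_cast h2

-- splitting a list's length by a predicate
theorem pv_countP_not (l : List Char) (p : Char → Bool) :
    l.countP p + l.countP (fun a => !p a) = l.length := by
  induction l with
  | nil => rfl
  | cons x t ih =>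
    simp only [List.countP_cons, List.length_cons]
    cases h : p x <;> simp <;> omega

-- pvMax is an upper bound of and attained in a nonempty list
theorem pv_le_pvMax (xs : List Int) (y : Int) (hy : y ∈ xs) : y ≤ pvMax xs := by
  cases xs with
  | nil => cases hy
  | cons x t =>
    have h := PySem.List.le_foldl_max t x
    rcases List.mem_cons.mp hy with h1 | h1
    · subst h1; exact h.1
    · exact h.2 y h1

theorem pv_pvMax_mem (xs : List Int) (h : xs ≠ []) : pvMax xs ∈ xs := by
  cases xs with
  | nil => exact absurd rfl h
  | cons x t => exact List.max?_mem rfl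

-- A's max frequency over the 26 letter slots equals B's max of count over the string's own characters
set_option maxRecDepth 10000 in
theorem pv_maxfreq (l : List Char) (hl : ∀ c ∈ l, 97 ≤ c.toNat ∧ c.toNat ≤ 122) :
    pvMax ((List.range 26).map (fun j => (l.count (Char.ofNat (97 + j)) : Int)))
      = pvMax ((PySem.Set.ofList l).map (fun ch => (l.count ch : Int))) := by
  cases l with
  | nil => decide
  | cons x t =>
    apply le_antisymm
    · have hmemA : pvMax ((List.range 26).map (fun j => ((x :: t).count (Char.ofNat (97 + j)) : Int)))
          ∈ (List.range 26).map (fun j => ((x :: t).count (Char.ofNat (97 + j)) : Int)) :=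
        pv_pvMax_mem _ (by simp)
      obtain ⟨j, _, hjeq⟩ := List.mem_map.mp hmemA
      by_cases hz : (x :: t).count (Char.ofNat (97 + j)) = 0
      · rw [← hjeq, hz]
        have hx : ((x :: t).count x : Int)
            ∈ (PySem.Set.ofList (x :: t)).map (fun ch => ((x :: t).count ch : Int)) :=
          List.mem_map.mpr ⟨x, (PySem.Set.mem_ofList _ _).mpr List.mem_cons_self, rfl⟩
        have hxpos : 0 < (x :: t).count x := List.count_pos_iff.mpr List.mem_cons_self
        have := pv_le_pvMax _ _ hx
        push_cast
        omega
      · have hmem : Char.ofNat (97 + j) ∈ x :: t := List.count_pos_iff.mp (Nat.pos_of_ne_zero hz)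
        rw [← hjeq]
        exact pv_le_pvMax _ _
          (List.mem_map.mpr ⟨_, (PySem.Set.mem_ofList _ _).mpr hmem, rfl⟩)
    · have hne : (PySem.Set.ofList (x :: t)).map (fun ch => ((x :: t).count ch : Int)) ≠ [] := by
        refine List.ne_nil_of_mem (a := ((x :: t).count x : Int)) ?_
        exact List.mem_map.mpr ⟨x, (PySem.Set.mem_ofList _ _).mpr List.mem_cons_self, rfl⟩
      have hmemB : pvMax ((PySem.Set.ofList (x :: t)).map (fun ch => ((x :: t).count ch : Int)))
          ∈ (PySem.Set.ofList (x :: t)).map (fun ch => ((x :: t).count ch : Int)) :=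
        pv_pvMax_mem _ hne
      obtain ⟨ch, hch0, hcheq⟩ := List.mem_map.mp hmemB
      have hch : ch ∈ x :: t := (PySem.Set.mem_ofList _ _).mp hch0
      obtain ⟨h1, h2⟩ := hl ch hch
      have hchar : Char.ofNat (97 + (ch.toNat - 97)) = ch := by
        have h97 : 97 + (ch.toNat - 97) = ch.toNat := by omega
        rw [h97, Char.ofNat_toNat]
      rw [← hcheq]
      refine pv_le_pvMax _ _ (List.mem_map.mpr ⟨ch.toNat - 97, List.mem_range.mpr (by omega), ?_⟩)
      rw [hchar]

-- a cutoff candidate: prefix sum of counts = comparison count against the cutoff letter, both directions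
theorem pv_prefix_le (l : List Char) (hl : ∀ c ∈ l, 97 ≤ c.toNat ∧ c.toNat ≤ 122) (i : Nat) (hi : i < 25) :
    (((List.range 26).map (fun j => (l.count (Char.ofNat (97 + j)) : Int))).take (i + 1)).sum
      = (l.countP (fun ch => ch ≤ Char.ofNat (97 + i)) : Int) := by
  have hvalid : (97 + i).isValidChar := Or.inl (by omega)
  rw [← List.map_take, List.take_range, Nat.min_eq_left (by omega),
      pv_sumCounts l hl (i + 1) (by omega)]
  have hcut : (Char.ofNat (97 + i)).toNat = 97 + i := by rw [Char.toNat_ofNat, if_pos hvalid]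
  congr 1
  refine List.countP_congr (fun ch _ => ?_)
  simp only [decide_eq_true_eq]
  have hle : (ch ≤ Char.ofNat (97 + i)) ↔ ch.toNat ≤ 97 + i := by
    rw [show (ch ≤ Char.ofNat (97 + i)) ↔ ch.toNat ≤ (Char.ofNat (97 + i)).toNat from Iff.rfl, hcut]
  rw [hle]
  omega

theorem pv_prefix_gt (l : List Char) (hl : ∀ c ∈ l, 97 ≤ c.toNat ∧ c.toNat ≤ 122) (i : Nat) (hi : i < 25) :
    (l.length : Int) - (((List.range 26).map (fun j => (l.count (Char.ofNat (97 + j)) : Int))).take (i + 1)).sum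
      = (l.countP (fun ch => Char.ofNat (97 + i) < ch) : Int) := by
  rw [pv_prefix_le l hl i hi]
  have hsplit := pv_countP_not l (fun ch => decide (ch ≤ Char.ofNat (97 + i)))
  have hnot : l.countP (fun a => !decide (a ≤ Char.ofNat (97 + i)))
      = l.countP (fun ch => decide (Char.ofNat (97 + i) < ch)) := by
    refine List.countP_congr (fun ch _ => ?_)
    simp only [Bool.not_eq_true', decide_eq_false_iff_not, decide_eq_true_eq]
    exact not_le
  rw [hnot] at hsplit
  omega

-- ===== VERDICT (by name: the statement is the Claim_ definition above) =====
theorem minCharacters_spec : Claim_equal_minCharacters := by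
  intro a b _ hpre
  unfold Pre_minCharacters at hpre
  simp only [Bool.and_eq_true, List.all_eq_true, decide_eq_true_eq, Bool.and_eq_true,
    decide_eq_true_eq] at hpre
  obtain ⟨ha, hb⟩ := hpre
  have ha' : ∀ c ∈ a.toList, 97 ≤ c.toNat ∧ c.toNat ≤ 122 := by
    intro c hc; have := ha c hc; simpa using this
  have hb' : ∀ c ∈ b.toList, 97 ≤ c.toNat ∧ c.toNat ≤ 122 := by
    intro c hc; have := hb c hc; simpa using this
  simp only [Spec_minCharacters, minCharacters, minCharacters_alt]
  rw [pvCountFold_eq a.toList ha', pvCountFold_eq b.toList hb',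
      pvLoop_eq _ _ (by simp) (by simp),
      pv_cutChars, List.foldl_map, pv_foldl_minpair,
      pv_maxfreq a.toList ha', pv_maxfreq b.toList hb']
  congr 1
  refine List.flatMap_congr (fun i hi => ?_)
  have hi25 : i < 25 := List.mem_range.mp hi
  rw [pv_prefix_le a.toList ha' i hi25, pv_prefix_le b.toList hb' i hi25]
  have hga := pv_prefix_gt a.toList ha' i hi25
  have hgb := pv_prefix_gt b.toList hb' i hi25
  rw [pv_prefix_le a.toList ha' i hi25] at hga
  rw [pv_prefix_le b.toList hb' i hi25] at hgb
  rw [PySem.Str.len_eq, PySem.Str.len_eq]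
  simp only [List.cons.injEq, and_true]
  constructor
  · omega
  · omega
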